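-- pv_equiv track=rewrite | github.com/parkchanghyup/algorithm | python/프로그래머스/[python] 프로그래머스 - 방금 그 곡.py | sharp
-- ===== SOURCE A (Python) =====
-- def sharp(m :str):
--     re_m= ''
--
--     for i in range(len(m)-1):
--         if len(re_m) > i : continue
--         if m[i+1] =='#':
--             re_m+=m[i].lower()+'#'
--         else:
--             re_m+=m[i]
--     if len(re_m) != len(m):
--         re_m+=m[-1]
--
--
--     return re_m.replace('#','')
-- ===== SOURCE B (Python) =====
-- def sharp(m: str):
--     res = []
--     for c in m:
--         if c == '#':
--             if res:
--                 res[-1] = res[-1].lower()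
--         else:
--             res.append(c)
--     return ''.join(res)
-- ===== Notes on version B (the rewrite author's own statement) =====
-- stated objective: simpler
-- what changed: Replaces A's look-ahead index loop with a skip trick, a length-mismatch fix-up and a final replace('#','') by a single look-back pass that appends normal characters and back-patches the last appended character to lowercase when a '#' is read.
import Mathlib
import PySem

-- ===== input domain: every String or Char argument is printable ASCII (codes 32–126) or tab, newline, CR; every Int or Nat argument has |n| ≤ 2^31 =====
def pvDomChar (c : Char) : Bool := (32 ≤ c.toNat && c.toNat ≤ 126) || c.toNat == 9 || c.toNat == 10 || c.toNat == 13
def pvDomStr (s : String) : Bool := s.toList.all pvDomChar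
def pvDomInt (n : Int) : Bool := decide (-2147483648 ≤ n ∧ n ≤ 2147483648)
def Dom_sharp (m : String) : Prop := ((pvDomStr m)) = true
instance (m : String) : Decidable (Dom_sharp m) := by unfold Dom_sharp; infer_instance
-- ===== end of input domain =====

-- B replaces A's look-ahead loop (index skip trick + length fix-up + replace('#','')) by a
-- single look-back pass that back-patches the previously appended character; simpler, same cost.

-- ===== PORT A =====
-- loop body of A: 'if len(re_m) > i: continue; if m[i+1]=="#": re_m += m[i].lower()+"#" else re_m += m[i]'
def sharpStepA (L : List Char) (re : List Char) (i : Nat) : List Char :=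
  if re.length > i then re
  else if L.getD (i + 1) ' ' = '#' then re ++ [PySem.Chars.lowerChar (L.getD i ' '), '#']
  else re ++ [L.getD i ' ']

def sharp (m : String) : String :=
  let L := m.toList
  -- for i in range(len(m)-1): …   (indices i and i+1 are always in range, so getD is exact)
  let re := (List.range (L.length - 1)).foldl (sharpStepA L) []
  -- if len(re_m) != len(m): re_m += m[-1]   (reached only with m nonempty, so pyGet? is some)
  let re2 := if re.length ≠ L.length then
      re ++ (match PySem.List.pyGet? L (-1) with | some c => [c] | none => [])
    else re
  -- return re_m.replace('#','')
  String.ofList (PySem.Chars.replace re2 ['#'] [])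

-- ===== PORT B =====
-- loop body of B: 'if c == "#": (if res: res[-1] = res[-1].lower()) else res.append(c)'
def sharpStepB (res : List Char) (c : Char) : List Char :=
  if c = '#' then
    match res.getLast? with
    | none => res
    | some x => res.dropLast ++ [PySem.Chars.lowerChar x]
  else res ++ [c]

def sharp_alt (m : String) : String :=
  String.ofList (m.toList.foldl sharpStepB [])

-- ===== PRECONDITION & SPEC =====
def Spec_sharp (m : String) (out : String) : Prop := out = sharp_alt m
instance (m : String) (out : String) : Decidable (Spec_sharp m out) := by unfold Spec_sharp; infer_instance

-- ===== CLAIM (what is proved, stated in full; the proofs are below) =====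
def Claim_equal_sharp : Prop := ∀ (m : String), Dom_sharp m → Spec_sharp m (sharp m)

-- ===== LEMMAS AND PROOFS =====

-- common reference function: drop every '#', lowering the character before a '#'
def gSpec : List Char → List Char
  | [] => []
  | c :: rest =>
      if c = '#' then gSpec rest
      else (if rest.head? = some '#' then PySem.Chars.lowerChar c else c) :: gSpec rest

-- what A's index loop produces (pairs consumed on a '#', trailing singleton left out)
def lSpec : List Char → List Char
  | [] => []
  | [_] => []
  | c₁ :: c₂ :: rest =>
      if c₂ = '#' then PySem.Chars.lowerChar c₁ :: '#' :: lSpec rest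
      else c₁ :: lSpec (c₂ :: rest)
  termination_by xs => xs.length

-- A's re_m after the length fix-up
def hSpec : List Char → List Char
  | [] => []
  | [c] => [c]
  | c₁ :: c₂ :: rest =>
      if c₂ = '#' then PySem.Chars.lowerChar c₁ :: '#' :: hSpec rest
      else c₁ :: hSpec (c₂ :: rest)
  termination_by xs => xs.length

-- facts about Python's single-char .lower() on the ASCII domain
theorem upper_bounds (c : Char) (h : PySem.Chars.isupper c = true) :
    65 ≤ c.toNat ∧ c.toNat ≤ 90 := by
  have h2 : 'A' ≤ c ∧ c ≤ 'Z' := by simpa [PySem.Chars.isupper] using h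
  obtain ⟨ha, hb⟩ := h2
  rw [Char.le_def] at ha hb
  exact ⟨by exact_mod_cast UInt32.le_iff_toNat_le.mp ha, by exact_mod_cast UInt32.le_iff_toNat_le.mp hb⟩

theorem lowerChar_toNat (c : Char) (h : PySem.Chars.isupper c = true) :
    (PySem.Chars.lowerChar c).toNat = c.toNat + 32 := by
  obtain ⟨ha, hb⟩ := upper_bounds c h
  have hv : (c.toNat + 32).isValidChar := by left; omega
  unfold PySem.Chars.lowerChar
  rw [h, if_pos rfl]
  rw [Char.ofNat, dif_pos hv]
  exact Char.toNat_ofNatAux hv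

theorem lowerChar_of_not_upper (c : Char) (h : PySem.Chars.isupper c = false) :
    PySem.Chars.lowerChar c = c := by
  unfold PySem.Chars.lowerChar
  rw [h]; simp

theorem isupper_false_of_toNat (x : Char) (h : 90 < x.toNat) :
    PySem.Chars.isupper x = false := by
  unfold PySem.Chars.isupper
  have : ¬ (x ≤ 'Z') := by
    rw [Char.le_def]
    intro hle
    have := UInt32.le_iff_toNat_le.mp hle
    have h90 : x.toNat ≤ 90 := by exact_mod_cast this
    omega
  simp [this]

theorem lowerChar_idem (c : Char) :
    PySem.Chars.lowerChar (PySem.Chars.lowerChar c) = PySem.Chars.lowerChar c := by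
  by_cases h : PySem.Chars.isupper c = true
  · have h1 := lowerChar_toNat c h
    have h2 := upper_bounds c h
    exact lowerChar_of_not_upper _ (isupper_false_of_toNat _ (by omega))
  · rw [lowerChar_of_not_upper c (by simpa using h)]
    rw [lowerChar_of_not_upper c (by simpa using h)]

theorem lowerChar_ne_hash (c : Char) (h : c ≠ '#') : PySem.Chars.lowerChar c ≠ '#' := by
  by_cases hu : PySem.Chars.isupper c = true
  · intro he
    have h1 := lowerChar_toNat c hu
    have h2 := upper_bounds c hu
    rw [he] at h1
    have : ('#' : Char).toNat = 35 := by decide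
    omega
  · rw [lowerChar_of_not_upper c (by simpa using hu)]; exact h

theorem lowerChar_hash : PySem.Chars.lowerChar '#' = '#' := by decide

-- replace('#','') is filtering out '#'
theorem replace_go_filter (fuel : Nat) (l acc : List Char) (h : l.length ≤ fuel) :
    PySem.Chars.replace.go ['#'] [] fuel l acc = acc.reverse ++ l.filter (· ≠ '#') := by
  induction fuel generalizing l acc with
  | zero =>
    have : l = [] := by cases l <;> simp_all
    subst this
    simp [PySem.Chars.replace.go]
  | succ n ih =>
    cases l with
    | nil => simp [PySem.Chars.replace.go]
    | cons c t =>
      rw [PySem.Chars.replace.go]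
      by_cases hc : c = '#'
      · subst hc
        rw [if_pos (by simp [List.isPrefixOf])]
        simp only [List.length_cons] at h
        rw [ih _ _ (by simpa using Nat.le_of_succ_le_succ h)]
        simp
      · rw [if_neg (by simp [List.isPrefixOf]; exact fun he => hc he.symm)]
        simp only [List.length_cons] at h
        rw [ih _ _ (Nat.le_of_succ_le_succ h)]
        simp [hc]

theorem replace_hash_filter (s : List Char) :
    PySem.Chars.replace s ['#'] [] = s.filter (· ≠ '#') := by
  rw [PySem.Chars.replace]
  rw [if_neg (by simp)]
  simpa using replace_go_filter s.length s [] le_rfl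

-- B's fold computes gSpec
theorem foldB_acc_aux (n : Nat) : ∀ (xs : List Char), xs.length ≤ n →
    ∀ (acc : List Char) (c : Char), c ≠ '#' →
    (xs.foldl sharpStepB (acc ++ [c])) = acc ++ gSpec (c :: xs) := by
  induction n with
  | zero =>
    intro xs hx acc c hc
    have : xs = [] := by cases xs <;> simp_all
    subst this
    simp [gSpec, hc]
  | succ n ih =>
    intro xs hx acc c hc
    cases xs with
    | nil => simp [gSpec, hc]
    | cons d rest =>
      simp only [List.length_cons] at hx
      by_cases hd : d = '#'
      · subst hd
        rw [List.foldl_cons]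
        have hstep : sharpStepB (acc ++ [c]) '#' = acc ++ [PySem.Chars.lowerChar c] := by
          simp [sharpStepB]
        rw [hstep]
        rw [ih rest (Nat.le_of_succ_le_succ hx) acc (PySem.Chars.lowerChar c) (lowerChar_ne_hash c hc)]
        simp only [gSpec, if_neg hc, if_neg (lowerChar_ne_hash c hc)]
        simp [lowerChar_idem]
      · rw [List.foldl_cons]
        have hstep : sharpStepB (acc ++ [c]) d = (acc ++ [c]) ++ [d] := by
          simp [sharpStepB, hd]
        rw [hstep]
        rw [ih rest (Nat.le_of_succ_le_succ hx) (acc ++ [c]) d hd]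
        simp only [gSpec, if_neg hc, if_neg hd]
        simp [hd, List.append_assoc]

theorem foldB_gSpec (xs : List Char) : xs.foldl sharpStepB [] = gSpec xs := by
  induction xs with
  | nil => rfl
  | cons c rest ih =>
    by_cases hc : c = '#'
    · subst hc
      simp only [List.foldl_cons, sharpStepB]
      simp only [List.getLast?_nil]
      simp [gSpec, ih]
    · simp only [List.foldl_cons]
      have : sharpStepB [] c = [] ++ [c] := by simp [sharpStepB, hc]
      rw [this, foldB_acc_aux rest.length rest le_rfl [] c hc]
      simp [gSpec, hc]

-- A's loop computes lSpec
theorem getD_of_drop (L : List Char) (j : Nat) (c : Char) (t : List Char)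
    (hd : L.drop j = c :: t) : L[j]? = some c := by
  have h0 : (L.drop j)[0]? = some c := by rw [hd]; rfl
  rw [List.getElem?_drop] at h0
  simpa using h0

theorem loopA_aux (n : Nat) : ∀ (xs L re : List Char) (j : Nat), xs.length ≤ n →
    L.drop j = xs → re.length = j →
    (List.range' j (L.length - 1 - j)).foldl (sharpStepA L) re = re ++ lSpec xs := by
  induction n with
  | zero =>
    intro xs L re j hn hd hl
    have hx : xs = [] := by cases xs <;> simp_all
    subst hx
    have : L.length ≤ j := by
      have := List.drop_eq_nil_iff.mp hd; omega
    have : L.length - 1 - j = 0 := by omega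
    rw [this]
    simp [lSpec]
  | succ n ih =>
    intro xs L re j hn hd hl
    cases xs with
    | nil =>
      have : L.length ≤ j := by have := List.drop_eq_nil_iff.mp hd; omega
      have h0 : L.length - 1 - j = 0 := by omega
      rw [h0]; simp [lSpec]
    | cons c₁ tail =>
      have hlen' : L.length - j = tail.length + 1 := by
        simpa using congrArg List.length hd
      have hlen : L.length = j + tail.length + 1 := by omega
      cases tail with
      | nil =>
        have h0 : L.length - 1 - j = 0 := by simp at hlen; omega
        rw [h0]; simp [lSpec]
      | cons c₂ rest =>
        simp only [List.length_cons] at hlen hn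
        have hcount : L.length - 1 - j = (L.length - 1 - (j+1)) + 1 := by omega
        rw [hcount, List.range'_succ, List.foldl_cons]
        have hg1 : L[j]? = some c₁ := getD_of_drop L j c₁ (c₂ :: rest) hd
        have hd1 : L.drop (j+1) = c₂ :: rest := by
          rw [← List.drop_drop, hd]
          rfl
        have hg2 : L[j+1]? = some c₂ := getD_of_drop L (j+1) c₂ rest hd1
        have hstep0 : ¬ (re.length > j) := by omega
        by_cases hc2 : c₂ = '#'
        · have hstep : sharpStepA L re j = re ++ [PySem.Chars.lowerChar c₁, '#'] := by
            unfold sharpStepA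
            rw [if_neg hstep0]
            simp only [List.getD_eq_getElem?_getD]
            rw [hg1, hg2]
            simp [hc2]
          rw [hstep]
          have hd2 : L.drop (j+2) = rest := by
            rw [← List.drop_drop, hd]
            rfl
          cases rest with
          | nil =>
            have h0 : L.length - 1 - (j+1) = 0 := by simp at hlen; omega
            rw [h0]
            simp [lSpec, hc2]
          | cons c₃ rest' =>
            have hcount2 : L.length - 1 - (j+1) = (L.length - 1 - (j+2)) + 1 := by
              simp at hlen; omega
            rw [hcount2, List.range'_succ, List.foldl_cons]
            have hskip : sharpStepA L (re ++ [PySem.Chars.lowerChar c₁, '#']) (j+1) = re ++ [PySem.Chars.lowerChar c₁, '#'] := by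
              simp [sharpStepA]; omega
            rw [hskip]
            rw [ih (c₃ :: rest') L (re ++ [PySem.Chars.lowerChar c₁, '#']) (j+2)
                (by omega) hd2 (by simp; omega)]
            simp [lSpec, hc2]
        · have hstep : sharpStepA L re j = re ++ [c₁] := by
            unfold sharpStepA
            rw [if_neg hstep0]
            simp only [List.getD_eq_getElem?_getD]
            rw [hg1, hg2]
            simp [hc2]
          rw [hstep]
          rw [ih (c₂ :: rest) L (re ++ [c₁]) (j+1) (by simp; omega) hd1 (by simp; omega)]
          rw [lSpec]
          simp [hc2]

-- the fix-up turns lSpec into hSpec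
theorem len_lSpec_le_aux (n : Nat) : ∀ xs : List Char, xs.length ≤ n →
    (lSpec xs).length ≤ xs.length := by
  induction n with
  | zero => intro xs h; have : xs = [] := by cases xs <;> simp_all
            subst this; simp [lSpec]
  | succ n ih =>
    intro xs h
    match xs with
    | [] => simp [lSpec]
    | [c] => simp [lSpec]
    | c₁ :: c₂ :: rest =>
      rw [lSpec]
      simp only [List.length_cons] at h ⊢
      by_cases hc : c₂ = '#'
      · simp only [if_pos hc, List.length_cons]
        have := ih rest (by omega)
        omega
      · simp only [if_neg hc, List.length_cons]
        have := ih (c₂ :: rest) (by simp; omega)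
        simp at this
        omega

theorem len_lSpec_le (xs : List Char) : (lSpec xs).length ≤ xs.length :=
  len_lSpec_le_aux xs.length xs le_rfl

theorem fixup_hSpec_aux (n : Nat) : ∀ xs : List Char, xs.length ≤ n →
    (if (lSpec xs).length ≠ xs.length then
        lSpec xs ++ (match xs.getLast? with | some c => [c] | none => [])
      else lSpec xs) = hSpec xs := by
  induction n with
  | zero => intro xs h; have : xs = [] := by cases xs <;> simp_all
            subst this; simp [lSpec, hSpec]
  | succ n ih =>
    intro xs h
    match xs with
    | [] => simp [lSpec, hSpec]
    | [c] => simp [lSpec, hSpec]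
    | c₁ :: c₂ :: rest =>
      rw [lSpec, hSpec]
      simp only [List.length_cons] at h
      by_cases hc : c₂ = '#'
      · simp only [if_pos hc]
        cases rest with
        | nil => simp [lSpec, hSpec]
        | cons c₃ rest' =>
          have ihr := ih (c₃ :: rest') (by simp at h ⊢; omega)
          have hlast : (c₁ :: c₂ :: c₃ :: rest').getLast? = (c₃ :: rest').getLast? := by
            simp [List.getLast?_cons_cons]
          have hle := len_lSpec_le (c₃ :: rest')
          by_cases hne : (lSpec (c₃ :: rest')).length ≠ (c₃ :: rest').length
          · rw [if_pos hne] at ihr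
            rw [if_pos (by simp only [List.length_cons, ne_eq] at hne ⊢; omega), hlast, ← ihr]
            simp
          · rw [if_neg hne] at ihr
            rw [if_neg (by simp only [List.length_cons, ne_eq] at hne ⊢; omega), ← ihr]
      · simp only [if_neg hc]
        have ihr := ih (c₂ :: rest) (by simp at h ⊢; omega)
        have hlast : (c₁ :: c₂ :: rest).getLast? = (c₂ :: rest).getLast? := by
          simp [List.getLast?_cons_cons]
        have hle := len_lSpec_le (c₂ :: rest)
        by_cases hne : (lSpec (c₂ :: rest)).length ≠ (c₂ :: rest).length
        · rw [if_pos hne] at ihr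
          rw [if_pos (by simp only [List.length_cons, ne_eq] at hne ⊢; omega), hlast, ← ihr]
          simp
        · rw [if_neg hne] at ihr
          rw [if_neg (by simp only [List.length_cons, ne_eq] at hne ⊢; omega), ← ihr]

-- filtering '#' out of hSpec gives gSpec
theorem filter_hSpec_aux (n : Nat) : ∀ xs : List Char, xs.length ≤ n →
    (hSpec xs).filter (· ≠ '#') = gSpec xs := by
  induction n with
  | zero => intro xs h; have : xs = [] := by cases xs <;> simp_all
            subst this; simp [hSpec, gSpec]
  | succ n ih =>
    intro xs h
    match xs with
    | [] => simp [hSpec, gSpec]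
    | [c] =>
      by_cases hc : c = '#'
      · subst hc; simp [hSpec, gSpec]
      · simp [hSpec, gSpec, hc]
    | c₁ :: c₂ :: rest =>
      rw [hSpec]
      simp only [List.length_cons] at h
      by_cases hc2 : c₂ = '#'
      · simp only [if_pos hc2]
        by_cases hc1 : c₁ = '#'
        · subst hc1
          rw [List.filter_cons, List.filter_cons]
          simp only [lowerChar_hash]
          simp only [gSpec, hc2]
          rw [ih rest (by omega)]
          simp
        · rw [List.filter_cons, List.filter_cons]
          have h1 := lowerChar_ne_hash c₁ hc1
          simp only [gSpec, if_neg hc1, hc2]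
          rw [ih rest (by omega)]
          simp [h1]
      · simp only [if_neg hc2]
        rw [List.filter_cons]
        rw [ih (c₂ :: rest) (by simp; omega)]
        by_cases hc1 : c₁ = '#'
        · subst hc1
          simp [gSpec]
        · simp only [gSpec, if_neg hc1]
          simp [hc1, hc2]

-- ===== VERDICT (by name: the statement is the Claim_ definition above) =====
theorem sharp_spec : Claim_equal_sharp := by
  intro m _
  unfold Spec_sharp sharp sharp_alt
  simp only []
  rw [foldB_gSpec]
  have h1 : (List.range (m.toList.length - 1)).foldl (sharpStepA m.toList) [] = lSpec m.toList := by
    have := loopA_aux m.toList.length m.toList m.toList [] 0 le_rfl (by simp) (by simp)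
    simpa [List.range_eq_range'] using this
  rw [h1]
  have h2 := fixup_hSpec_aux m.toList.length m.toList le_rfl
  rw [PySem.List.pyGet?_neg_one, h2, replace_hash_filter,
    filter_hSpec_aux m.toList.length m.toList le_rfl]
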